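-- pv_equiv track=rewrite | github.com/miliar/Code_Jam_Webscraper | solutions_python/solutions_year17_round0_nr3/160.py | solve
-- ===== SOURCE A (Python) =====
-- def solve(n,k):
-- 	a=1
-- 	p=0
-- 	while(a<=k):
-- 		a*=2
-- 		p+=1
-- 	p-=1
-- 	a//=2
-- 	m1=1
-- 	m2=0
-- 	larger = n
-- 	for i in range(p):
-- 		new_larger = larger // 2
-- 		q1=q2=0
-- 		if(larger % 2 == 0):
-- 			q1 += m1
-- 			q2 += m1
-- 			q2 += 2*m2
-- 		else:
-- 			q1 += 2*m1
-- 			q1 += m2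
-- 			q2 += m2
-- 		larger = new_larger
-- 		m1,m2=q1,q2
-- 	k=k-a
-- 	if(k<m1):
-- 		return ans(larger)
-- 	else:
-- 		return ans(larger-1)
--
-- def ans(x):
-- 	return ((x)//2,(x-1)//2)
-- ===== SOURCE B (Python) =====
-- def solve(n, k):
--     # Closed form: the k-th arrival (1-based within BFS order) lands at level
--     # p = floor(log2 k); there the segment sizes are n//2**p and n//2**p - 1,
--     # with exactly n % 2**p + 1 segments of the larger size, taken first.
--     if k <= 0:
--         return (n // 2, (n - 1) // 2)
--     p = k.bit_length() - 1
--     a = 2 ** p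
--     x = n // a if k - a < n % a + 1 else n // a - 1
--     return (x // 2, (x - 1) // 2)
-- ===== Notes on version B (the rewrite author's own statement) =====
-- stated objective: simpler
-- what changed: Replaces A's doubling while-loop and per-level (m1,m2) count recurrence by a closed form: p = k.bit_length()-1, and the segment size at level p is read off n // 2**p and n % 2**p directly.
import Mathlib
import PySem

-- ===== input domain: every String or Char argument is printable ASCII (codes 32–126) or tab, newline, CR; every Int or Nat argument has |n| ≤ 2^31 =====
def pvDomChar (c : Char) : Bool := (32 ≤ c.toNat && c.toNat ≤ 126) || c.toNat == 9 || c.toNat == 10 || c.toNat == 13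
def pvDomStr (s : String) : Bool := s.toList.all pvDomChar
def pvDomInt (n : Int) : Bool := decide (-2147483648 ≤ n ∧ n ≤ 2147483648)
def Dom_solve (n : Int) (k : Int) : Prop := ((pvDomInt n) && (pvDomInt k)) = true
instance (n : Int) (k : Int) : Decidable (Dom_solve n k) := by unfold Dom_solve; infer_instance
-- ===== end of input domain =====

-- B replaces A's two loops (doubling while-loop + per-level count recurrence) by a
-- closed form from p = k.bit_length()-1 and n divmod 2^p; objective: simpler.

-- ===== PORT A =====
-- while(a<=k): a*=2; p+=1   — fuel k.natAbs+2 always suffices (a doubles from 1)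
def solveWhile (k : Int) (a : Int) (p : Int) : Nat → Int × Int
  | 0 => (a, p)
  | fuel+1 => if a ≤ k then solveWhile k (a * 2) (p + 1) fuel else (a, p)

def ansA (x : Int) : Int × Int := (PySem.Int.floordiv x 2, PySem.Int.floordiv (x - 1) 2)

def solve (n : Int) (k : Int) : Int × Int :=
  let w := solveWhile k 1 0 (k.natAbs + 2)
  let p := w.2 - 1
  let a := PySem.Int.floordiv w.1 2
  let st := (PySem.List.pyRange 0 p 1).foldl (fun (s : Int × Int × Int) _ =>
      let larger := s.1
      let m1 := s.2.1
      let m2 := s.2.2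
      let new_larger := PySem.Int.floordiv larger 2
      if PySem.Int.mod larger 2 == 0 then
        (new_larger, m1, m1 + 2 * m2)
      else
        (new_larger, 2 * m1 + m2, m2)
    ) (n, 1, 0)
  let k' := k - a
  if k' < st.2.1 then ansA st.1 else ansA (st.1 - 1)

-- ===== PORT B =====
def solve_alt (n : Int) (k : Int) : Int × Int :=
  if k ≤ 0 then (PySem.Int.floordiv n 2, PySem.Int.floordiv (n - 1) 2)
  else
    let p : Nat := PySem.Int.bitLength k - 1
    let a : Int := 2 ^ p
    let x := if k - a < PySem.Int.mod n a + 1 then PySem.Int.floordiv n a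
             else PySem.Int.floordiv n a - 1
    (PySem.Int.floordiv x 2, PySem.Int.floordiv (x - 1) 2)

-- ===== PRECONDITION & SPEC =====
def Spec_solve (n : Int) (k : Int) (out : Int × Int) : Prop := out = solve_alt n k
instance (n : Int) (k : Int) (out : Int × Int) : Decidable (Spec_solve n k out) := by unfold Spec_solve; infer_instance

-- ===== CLAIM (what is proved, stated in full; the proofs are below) =====
def Claim_equal_solve : Prop := ∀ (n : Int) (k : Int), Dom_solve n k → Spec_solve n k (solve n k)

-- ===== LEMMAS AND PROOFS =====

-- the while-loop reaches the first power of two strictly above k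
lemma solveWhile_char (k : Int) (P : Nat) (hk : (2:Int) ^ P ≤ k) (hk2 : k < 2 ^ (P + 1)) :
    ∀ fuel i, i ≤ P + 1 → P + 1 ≤ i + fuel →
      solveWhile k (2 ^ i) (i : Int) fuel = ((2:Int) ^ (P + 1), ((P : Int) + 1)) := by
  intro fuel
  induction fuel with
  | zero =>
      intro i h1 h2
      have hi : i = P + 1 := by omega
      subst hi
      simp [solveWhile]
  | succ f ih =>
      intro i h1 h2
      by_cases hi : i = P + 1
      · subst hi
        simp only [solveWhile, if_neg (by omega : ¬ (2:Int) ^ (P + 1) ≤ k)]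
        push_cast
        ring_nf
      · have hiP : i ≤ P := by omega
        have hle : (2:Int) ^ i ≤ k :=
          le_trans (pow_le_pow_right₀ (by norm_num) hiP) hk
        have step : solveWhile k (2 ^ i) (i : Int) (f + 1)
            = solveWhile k (2 ^ i * 2) ((i : Int) + 1) f := by
          simp [solveWhile, hle]
        rw [step]
        have e1 : (2:Int) ^ i * 2 = 2 ^ (i + 1) := by ring
        have e2 : ((i : Int) + 1) = ((i + 1 : Nat) : Int) := by push_cast; ring
        rw [e1, e2]
        exact ih (i + 1) (by omega) (by omega)

-- one halving level of the divmod decomposition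
lemma level_step (n : Int) (p : Nat) :
    n / 2 ^ (p + 1) = (n / 2 ^ p) / 2 ∧
    n % 2 ^ (p + 1) = n % 2 ^ p + 2 ^ p * ((n / 2 ^ p) % 2) := by
  have hpos : (0:Int) < 2 ^ p := by positivity
  have hdr : n % 2 ^ p + 2 ^ p * (n / 2 ^ p) = n := Int.emod_add_mul_ediv n (2 ^ p)
  have hr0 : 0 ≤ n % 2 ^ p := Int.emod_nonneg n (by omega)
  have hr1 : n % 2 ^ p < 2 ^ p := Int.emod_lt_of_pos n hpos
  have hd2 : (n / 2 ^ p) % 2 + 2 * ((n / 2 ^ p) / 2) = n / 2 ^ p :=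
    Int.emod_add_mul_ediv (n / 2 ^ p) 2
  have hb2 : (n / 2 ^ p) % 2 = 0 ∨ (n / 2 ^ p) % 2 = 1 := Int.emod_two_eq_zero_or_one _
  have hmul : (2:Int) ^ p * (n / 2 ^ p)
      = 2 ^ p * ((n / 2 ^ p) % 2) + 2 ^ (p + 1) * ((n / 2 ^ p) / 2) := by
    conv_lhs => rw [← hd2]
    ring
  have key : (n % 2 ^ p + 2 ^ p * ((n / 2 ^ p) % 2)) + 2 ^ (p + 1) * ((n / 2 ^ p) / 2) = n := by
    linarith [hdr, hmul]
  have hu := (Int.ediv_emod_unique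
      (a := n) (b := (2:Int) ^ (p + 1))
      (q := (n / 2 ^ p) / 2) (r := n % 2 ^ p + 2 ^ p * ((n / 2 ^ p) % 2))
      (by positivity)).mpr
    ⟨by linarith [key], by rcases hb2 with h | h <;> rw [h] <;> omega,
     by have : (2:Int) ^ (p + 1) = 2 * 2 ^ p := by ring
        rcases hb2 with h | h <;> rw [h] <;> omega⟩
  exact ⟨hu.1, hu.2⟩

-- the for-loop state after p levels: (n / 2^p, n % 2^p + 1, 2^p - n % 2^p - 1)
lemma forLoop_char (n : Int) (p : Nat) :
    (PySem.List.pyRange 0 (p : Int) 1).foldl (fun (s : Int × Int × Int) _ =>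
      let larger := s.1
      let m1 := s.2.1
      let m2 := s.2.2
      let new_larger := PySem.Int.floordiv larger 2
      if PySem.Int.mod larger 2 == 0 then
        (new_larger, m1, m1 + 2 * m2)
      else
        (new_larger, 2 * m1 + m2, m2)) (n, 1, 0)
    = (n / 2 ^ p, n % 2 ^ p + 1, 2 ^ p - n % 2 ^ p - 1) := by
  induction p with
  | zero => simp [PySem.List.pyRange]
  | succ p ih =>
      have hsplit : PySem.List.pyRange 0 ((p + 1 : Nat) : Int) 1
          = PySem.List.pyRange 0 (p : Int) 1 ++ [(p : Int)] := by
        rw [PySem.List.pyRange_one_append 0 (p : Int) ((p + 1 : Nat) : Int) (by omega) (by push_cast; omega)]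
        congr 1
        rw [show ((p + 1 : Nat) : Int) = (p : Int) + 1 by push_cast; ring]
        rw [PySem.List.pyRange_one_cons (by omega)]
        simp [PySem.List.pyRange]
      rw [hsplit, List.foldl_append, ih]
      have hq : PySem.Int.floordiv (n / 2 ^ p) 2 = n / 2 ^ (p + 1) := by
        rw [PySem.Int.floordiv_eq_ediv_of_pos (by norm_num),
            Int.ediv_ediv_of_nonneg (by positivity)]
        norm_num [pow_succ]
      have hm : PySem.Int.mod (n / 2 ^ p) 2 = (n / 2 ^ p) % 2 :=
        PySem.Int.mod_eq_emod_of_pos (by norm_num)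
      obtain ⟨hdiv', hmod'⟩ := level_step n p
      have hpp : (2:Int) ^ (p + 1) = 2 * 2 ^ p := by ring
      rcases Int.emod_two_eq_zero_or_one (n / 2 ^ p) with h | h
      · simp only [List.foldl_cons, List.foldl_nil, hm, h]
        norm_num
        rw [h] at hmod'
        refine ⟨hdiv'.symm, by omega, by omega⟩
      · simp only [List.foldl_cons, List.foldl_nil, hm, h]
        norm_num
        rw [h] at hmod'
        refine ⟨hdiv'.symm, by omega, by omega⟩

-- ===== VERDICT (by name: the statement is the Claim_ definition above) =====
theorem solve_spec : Claim_equal_solve := by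
  intro n k _
  unfold Spec_solve
  by_cases hk : k ≤ 0
  · -- while-loop body never runs (1 > k); p = -1, a = 0, empty for-loop
    have hw : solveWhile k 1 0 (k.natAbs + 2) = (1, 0) := by
      simp [solveWhile, show ¬ (1:Int) ≤ k by omega]
    simp only [solve, hw]
    norm_num
    rw [if_pos (by omega : k < 1)]
    simp [solve_alt, hk, ansA]
  · replace hk : 0 < k := by omega
    set P : Nat := PySem.Int.bitLength k - 1 with hP
    have hkne : k ≠ 0 := by omega
    have hbl_pos : 1 ≤ PySem.Int.bitLength k := by
      have hlt := PySem.Int.lt_two_pow_bitLength k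
      by_contra h
      have h0 : PySem.Int.bitLength k = 0 := by omega
      rw [h0, pow_zero] at hlt
      omega
    have hlow : (2:Int) ^ P ≤ k := by
      have h := PySem.Int.two_pow_bitLength_le k hkne
      have hna : k.natAbs = k.toNat := by omega
      rw [hna, ← hP] at h
      calc (2:Int) ^ P = ((2 ^ P : Nat) : Int) := by push_cast; ring
        _ ≤ (k.toNat : Int) := by exact_mod_cast h
        _ = k := by omega
    have hhigh : k < 2 ^ (P + 1) := by
      have h := PySem.Int.lt_two_pow_bitLength k
      have hPe : P + 1 = PySem.Int.bitLength k := by omega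
      have hna : k.natAbs = k.toNat := by omega
      rw [hna] at h
      rw [hPe]
      calc k = (k.toNat : Int) := by omega
        _ < ((2 ^ PySem.Int.bitLength k : Nat) : Int) := by exact_mod_cast h
        _ = 2 ^ PySem.Int.bitLength k := by push_cast; ring
    have hfuel : P + 1 ≤ 0 + (k.natAbs + 2) := by
      have h1 : (2:Nat) ^ P ≤ k.natAbs := by
        have : ((2 ^ P : Nat) : Int) ≤ k := by push_cast; exact hlow
        omega
      have h2 : P < 2 ^ P := Nat.lt_two_pow_self
      omega
    have hw := solveWhile_char k P hlow hhigh (k.natAbs + 2) 0 (by omega) hfuel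
    simp only [pow_zero, Nat.cast_zero] at hw
    simp only [solve, hw]
    have ha : PySem.Int.floordiv ((2:Int) ^ (P + 1)) 2 = 2 ^ P := by
      rw [PySem.Int.floordiv_eq_ediv_of_pos (by norm_num), pow_succ]
      exact Int.mul_ediv_cancel _ (by norm_num)
    have hp1 : ((P : Int) + 1) - 1 = (P : Int) := by ring
    rw [hp1, ha, forLoop_char n P]
    have hmodB : PySem.Int.mod n (2 ^ P) = n % 2 ^ P :=
      PySem.Int.mod_eq_emod_of_pos (by positivity)
    have hdivB : PySem.Int.floordiv n (2 ^ P) = n / 2 ^ P :=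
      PySem.Int.floordiv_eq_ediv_of_pos (by positivity)
    simp only [solve_alt, if_neg (by omega : ¬ k ≤ 0), ← hP, hmodB, hdivB, ansA]
    by_cases hc : k - 2 ^ P < n % 2 ^ P + 1
    · rw [if_pos hc, if_pos hc]
    · rw [if_neg hc, if_neg hc]
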